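-- pv_equiv track=rewrite | github.com/waleedmustafa971/CarRecognition | src/main_backup_v4.py | normalize_brand_name
-- ===== SOURCE A (Python) =====
-- def normalize_brand_name(brand):
--     """
--     Normalize brand names for comparison
--     """
--     brand = brand.upper().strip()
--
--     brand_mappings = {
--         'KIA': ['KIA', 'KIA MOTORS'],
--         'HYUNDAI': ['HYUNDAI', 'HYUNDAI MOTOR'],
--         'TOYOTA': ['TOYOTA', 'TOYOTA MOTOR'],
--         'HONDA': ['HONDA', 'HONDA MOTOR'],
--         'NISSAN': ['NISSAN', 'NISSAN MOTOR'],
--         'MERCEDES-BENZ': ['MERCEDES', 'MERCEDES-BENZ', 'MERCEDES BENZ', 'BENZ'],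
--         'BMW': ['BMW'],
--         'AUDI': ['AUDI'],
--         'VOLKSWAGEN': ['VOLKSWAGEN', 'VW'],
--         'FORD': ['FORD', 'FORD MOTOR'],
--         'CHEVROLET': ['CHEVROLET', 'CHEVY'],
--         'TESLA': ['TESLA', 'TESLA MOTORS'],
--         'MG': ['MG', 'MG MOTOR', 'MORRIS GARAGES'],
--         'MAZDA': ['MAZDA', 'MAZDA MOTOR'],
--         'VOLVO': ['VOLVO', 'VOLVO CARS'],
--     }
--
--     for normalized, variants in brand_mappings.items():
--         if brand in variants:
--             return normalized
--
--     return brand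
-- ===== SOURCE B (Python) =====
-- _CANONICAL = {
--     'KIA': 'KIA', 'KIA MOTORS': 'KIA',
--     'HYUNDAI': 'HYUNDAI', 'HYUNDAI MOTOR': 'HYUNDAI',
--     'TOYOTA': 'TOYOTA', 'TOYOTA MOTOR': 'TOYOTA',
--     'HONDA': 'HONDA', 'HONDA MOTOR': 'HONDA',
--     'NISSAN': 'NISSAN', 'NISSAN MOTOR': 'NISSAN',
--     'MERCEDES': 'MERCEDES-BENZ', 'MERCEDES-BENZ': 'MERCEDES-BENZ',
--     'MERCEDES BENZ': 'MERCEDES-BENZ', 'BENZ': 'MERCEDES-BENZ',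
--     'BMW': 'BMW',
--     'AUDI': 'AUDI',
--     'VOLKSWAGEN': 'VOLKSWAGEN', 'VW': 'VOLKSWAGEN',
--     'FORD': 'FORD', 'FORD MOTOR': 'FORD',
--     'CHEVROLET': 'CHEVROLET', 'CHEVY': 'CHEVROLET',
--     'TESLA': 'TESLA', 'TESLA MOTORS': 'TESLA',
--     'MG': 'MG', 'MG MOTOR': 'MG', 'MORRIS GARAGES': 'MG',
--     'MAZDA': 'MAZDA', 'MAZDA MOTOR': 'MAZDA',
--     'VOLVO': 'VOLVO', 'VOLVO CARS': 'VOLVO',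
-- }
--
-- def normalize_brand_name(brand):
--     """Normalize brand names for comparison (flat reverse-lookup table)."""
--     brand = brand.upper().strip()
--     return _CANONICAL.get(brand, brand)
-- ===== Notes on version B (the rewrite author's own statement) =====
-- stated objective: idiomatic
-- what changed: Replaced the per-call loop over (canonical, variants) pairs with an inner list-membership scan by a module-level flat reverse dict (variant -> canonical) built once, so the function body is a single dict lookup with the stripped uppercased brand as default.
import Mathlib
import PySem

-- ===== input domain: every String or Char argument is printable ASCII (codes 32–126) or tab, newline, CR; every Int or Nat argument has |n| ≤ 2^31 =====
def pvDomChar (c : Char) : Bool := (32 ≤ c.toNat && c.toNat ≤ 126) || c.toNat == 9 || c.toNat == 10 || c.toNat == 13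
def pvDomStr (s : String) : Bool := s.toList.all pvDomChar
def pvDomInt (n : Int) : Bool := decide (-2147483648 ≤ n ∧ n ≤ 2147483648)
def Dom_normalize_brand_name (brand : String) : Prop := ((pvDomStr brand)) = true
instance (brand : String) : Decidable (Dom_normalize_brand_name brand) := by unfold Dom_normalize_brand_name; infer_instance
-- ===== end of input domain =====

-- B replaces A's per-call loop over (canonical, variants) with one flat reverse-lookup dict (idiomatic; same results).
-- ===== PORT A =====
def pvBrandMappings : List (String × List String) :=
  [("KIA", ["KIA", "KIA MOTORS"]),
   ("HYUNDAI", ["HYUNDAI", "HYUNDAI MOTOR"]),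
   ("TOYOTA", ["TOYOTA", "TOYOTA MOTOR"]),
   ("HONDA", ["HONDA", "HONDA MOTOR"]),
   ("NISSAN", ["NISSAN", "NISSAN MOTOR"]),
   ("MERCEDES-BENZ", ["MERCEDES", "MERCEDES-BENZ", "MERCEDES BENZ", "BENZ"]),
   ("BMW", ["BMW"]),
   ("AUDI", ["AUDI"]),
   ("VOLKSWAGEN", ["VOLKSWAGEN", "VW"]),
   ("FORD", ["FORD", "FORD MOTOR"]),
   ("CHEVROLET", ["CHEVROLET", "CHEVY"]),
   ("TESLA", ["TESLA", "TESLA MOTORS"]),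
   ("MG", ["MG", "MG MOTOR", "MORRIS GARAGES"]),
   ("MAZDA", ["MAZDA", "MAZDA MOTOR"]),
   ("VOLVO", ["VOLVO", "VOLVO CARS"])]

-- the 'for normalized, variants in …: if brand in variants: return normalized' loop
def pvFindBrand (s : String) : List (String × List String) → String
  | [] => s
  | (normalized, variants) :: rest =>
      if s ∈ variants then normalized else pvFindBrand s rest

def normalize_brand_name (brand : String) : String :=
  pvFindBrand (PySem.Str.strip (PySem.Str.upper brand)) pvBrandMappings

-- ===== PORT B =====
def pvCanonical : PySem.Dict String String :=
  PySem.Dict.mk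
    [("KIA", "KIA"), ("KIA MOTORS", "KIA"),
     ("HYUNDAI", "HYUNDAI"), ("HYUNDAI MOTOR", "HYUNDAI"),
     ("TOYOTA", "TOYOTA"), ("TOYOTA MOTOR", "TOYOTA"),
     ("HONDA", "HONDA"), ("HONDA MOTOR", "HONDA"),
     ("NISSAN", "NISSAN"), ("NISSAN MOTOR", "NISSAN"),
     ("MERCEDES", "MERCEDES-BENZ"), ("MERCEDES-BENZ", "MERCEDES-BENZ"),
     ("MERCEDES BENZ", "MERCEDES-BENZ"), ("BENZ", "MERCEDES-BENZ"),
     ("BMW", "BMW"),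
     ("AUDI", "AUDI"),
     ("VOLKSWAGEN", "VOLKSWAGEN"), ("VW", "VOLKSWAGEN"),
     ("FORD", "FORD"), ("FORD MOTOR", "FORD"),
     ("CHEVROLET", "CHEVROLET"), ("CHEVY", "CHEVROLET"),
     ("TESLA", "TESLA"), ("TESLA MOTORS", "TESLA"),
     ("MG", "MG"), ("MG MOTOR", "MG"), ("MORRIS GARAGES", "MG"),
     ("MAZDA", "MAZDA"), ("MAZDA MOTOR", "MAZDA"),
     ("VOLVO", "VOLVO"), ("VOLVO CARS", "VOLVO")]

def normalize_brand_name_alt (brand : String) : String :=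
  let b := PySem.Str.strip (PySem.Str.upper brand)
  pvCanonical.getD b b

-- ===== PRECONDITION & SPEC =====
def Spec_normalize_brand_name (brand : String) (out : String) : Prop := out = normalize_brand_name_alt brand
instance (brand : String) (out : String) : Decidable (Spec_normalize_brand_name brand out) := by unfold Spec_normalize_brand_name; infer_instance

-- ===== CLAIM (what is proved, stated in full; the proofs are below) =====
def Claim_equal_normalize_brand_name : Prop := ∀ (brand : String), Dom_normalize_brand_name brand → Spec_normalize_brand_name brand (normalize_brand_name brand)

-- ===== LEMMAS AND PROOFS =====

-- Core fact: A's first-match loop over (canonical, variants) agrees with B's flat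
-- reverse dict on EVERY query string (the variants are pairwise distinct).
theorem pvFind_eq_getD (s : String) :
    pvFindBrand s pvBrandMappings = pvCanonical.getD s s := by
  by_cases h : s ∈ (["KIA", "KIA MOTORS", "HYUNDAI", "HYUNDAI MOTOR", "TOYOTA",
      "TOYOTA MOTOR", "HONDA", "HONDA MOTOR", "NISSAN", "NISSAN MOTOR",
      "MERCEDES", "MERCEDES-BENZ", "MERCEDES BENZ", "BENZ", "BMW", "AUDI",
      "VOLKSWAGEN", "VW", "FORD", "FORD MOTOR", "CHEVROLET", "CHEVY",
      "TESLA", "TESLA MOTORS", "MG", "MG MOTOR", "MORRIS GARAGES",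
      "MAZDA", "MAZDA MOTOR", "VOLVO", "VOLVO CARS"] : List String)
  · simp only [List.mem_cons, List.not_mem_nil, or_false] at h
    rcases h with rfl | rfl | rfl | rfl | rfl | rfl | rfl | rfl | rfl | rfl | rfl |
      rfl | rfl | rfl | rfl | rfl | rfl | rfl | rfl | rfl | rfl | rfl | rfl | rfl |
      rfl | rfl | rfl | rfl | rfl | rfl | rfl <;> decide
  · simp only [List.mem_cons, List.not_mem_nil, or_false, not_or] at h
    obtain ⟨h1, h2, h3, h4, h5, h6, h7, h8, h9, h10, h11, h12, h13, h14, h15, h16, h17, h18, h19, h20, h21, h22, h23, h24, h25, h26, h27, h28, h29, h30, h31⟩ := h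
    simp [pvFindBrand, pvBrandMappings, pvCanonical,
      PySem.Dict.getD_eq_get?_getD, PySem.Dict.get?,
      h1, h2, h3, h4, h5, h6, h7, h8, h9, h10, h11, h12, h13, h14, h15, h16, h17, h18, h19, h20, h21, h22, h23, h24, h25, h26, h27, h28, h29, h30, h31,
      Ne.symm h1, Ne.symm h2, Ne.symm h3, Ne.symm h4, Ne.symm h5, Ne.symm h6, Ne.symm h7, Ne.symm h8, Ne.symm h9, Ne.symm h10, Ne.symm h11, Ne.symm h12, Ne.symm h13, Ne.symm h14, Ne.symm h15, Ne.symm h16, Ne.symm h17, Ne.symm h18, Ne.symm h19, Ne.symm h20, Ne.symm h21, Ne.symm h22, Ne.symm h23, Ne.symm h24, Ne.symm h25, Ne.symm h26, Ne.symm h27, Ne.symm h28, Ne.symm h29, Ne.symm h30, Ne.symm h31]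

-- ===== VERDICT (by name: the statement is the Claim_ definition above) =====
theorem normalize_brand_name_spec : Claim_equal_normalize_brand_name := by
  intro brand _
  unfold Spec_normalize_brand_name normalize_brand_name normalize_brand_name_alt
  exact pvFind_eq_getD _
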